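-- pv_equiv track=rewrite | github.com/ckoons/BubbleSpacetimeTheory | play/toy_289_circle_confinement.py | beta1_simplicial
-- ===== SOURCE A (Python) =====
-- from collections import defaultdict
--
-- def build_vig(n, clauses):
--     """Build Variable Incidence Graph: edge between variables sharing a clause."""
--     adj = defaultdict(set)
--     for clause in clauses:
--         vars_ = [v for v, _ in clause]
--         for i in range(3):
--             for j in range(i + 1, 3):
--                 adj[vars_[i]].add(vars_[j])
--                 adj[vars_[j]].add(vars_[i])
--     return adj
--
-- def vig_edges(adj, n):
--     """Return list of edges as (i, j) pairs with i < j."""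
--     edges = set()
--     for v in range(n):
--         for u in adj.get(v, set()):
--             if v < u:
--                 edges.add((v, u))
--     return sorted(edges)
--
-- class UnionFind:
--     def __init__(self, n):
--         self.parent = list(range(n))
--         self.rank = [0] * n
--
--     def find(self, x):
--         while self.parent[x] != x:
--             self.parent[x] = self.parent[self.parent[x]]
--             x = self.parent[x]
--         return x
--
--     def union(self, x, y):
--         rx, ry = self.find(x), self.find(y)
--         if rx == ry:
--             return False
--         if self.rank[rx] < self.rank[ry]:
--             rx, ry = ry, rx
--         self.parent[ry] = rx
--         if self.rank[rx] == self.rank[ry]: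
--             self.rank[rx] += 1
--         return True
--
-- def beta1_simplicial(n, clauses):
--     """β₁ of the VIG clique complex.
--     β₁ = edges - vertices + components - filled_triangles
--     where filled_triangles = clauses (each clause fills a 2-simplex)."""
--     adj = build_vig(n, clauses)
--     edges = vig_edges(adj, n)
--
--     # Count components
--     uf = UnionFind(n)
--     for u, v in edges:
--         uf.union(u, v)
--     components = len(set(uf.find(i) for i in range(n)))
--
--     # Each clause fills exactly one 2-simplex
--     n_filled = len(clauses)
--
--     # β₁ = E - V + C - F₂ (where F₂ = filled 2-faces)
--     beta1 = len(edges) - n + components - n_filled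
--     return max(beta1, 0)
-- ===== SOURCE B (Python) =====
-- def beta1_simplicial(n, clauses):
--     """beta1 of the VIG clique complex, via an explicit disjoint-set-merging
--     partition instead of union-find: edges of the graph on vertices 0..n-1 are
--     collected directly from the first three variables of each clause, then each
--     edge merges the components containing its endpoints."""
--     edges = set()
--     for clause in clauses:
--         vs = [clause[0][0], clause[1][0], clause[2][0]]
--         for i in range(3):
--             for j in range(i + 1, 3):
--                 a, b = vs[i], vs[j]
--                 if a > b:
--                     a, b = b, a
--                 if 0 <= a and a < b and b < n:
--                     edges.add((a, b))
--
--     comps = []  # disjoint non-empty sets of vertices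
--     for a, b in sorted(edges):
--         touching = [c for c in comps if a in c or b in c]
--         rest = [c for c in comps if a not in c and b not in c]
--         merged = {a, b}
--         for c in touching:
--             merged |= c
--         comps = rest + [merged]
--
--     isolated = sum(1 for v in range(n) if all(v not in c for c in comps))
--     components = len(comps) + isolated
--
--     return max(len(edges) - n + components - len(clauses), 0)
-- ===== Notes on version B (the rewrite author's own statement) =====
-- stated objective: alternative
-- what changed: Union-find (path compression + union by rank, then a root-scan with a set) is replaced by an explicit disjoint-set-merging partition: edges are collected directly from each clause's first three variables, each edge merges the component sets containing its endpoints, and components = merged sets + isolated vertices.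
import Mathlib
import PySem

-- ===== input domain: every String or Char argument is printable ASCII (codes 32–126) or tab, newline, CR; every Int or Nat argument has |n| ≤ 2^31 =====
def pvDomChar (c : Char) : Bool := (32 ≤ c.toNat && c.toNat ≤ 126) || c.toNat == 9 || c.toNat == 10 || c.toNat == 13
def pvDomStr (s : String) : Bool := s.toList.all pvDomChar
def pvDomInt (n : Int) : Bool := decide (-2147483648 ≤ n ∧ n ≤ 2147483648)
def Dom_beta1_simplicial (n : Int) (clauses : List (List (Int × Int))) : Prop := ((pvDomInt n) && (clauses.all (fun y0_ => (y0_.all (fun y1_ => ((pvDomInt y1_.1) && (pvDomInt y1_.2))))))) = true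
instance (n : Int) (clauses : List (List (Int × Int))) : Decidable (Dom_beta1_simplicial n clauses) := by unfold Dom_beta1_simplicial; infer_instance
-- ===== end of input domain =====

-- B replaces A's union-find component count by an explicit disjoint-set-merging
-- partition built straight from the clauses (alternative algorithm, same cost class).


-- ===== PORT A =====
-- build_vig: adj[vars_[i]].add(vars_[j]) both ways, over the 3 first variables of each clause
def pvBuildVigStep (adj : PySem.Dict Int (PySem.Set Int)) (clause : List (Int × Int)) :
    PySem.Dict Int (PySem.Set Int) :=
  let vars_ := clause.map Prod.fst
  (PySem.List.pyRange 0 3 1).foldl (fun adj i =>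
    (PySem.List.pyRange (i + 1) 3 1).foldl (fun adj j =>
      -- vars_[i] raises IndexError for clauses shorter than 3: excluded by Pre_
      let a := PySem.List.pyGetD vars_ i 0
      let b := PySem.List.pyGetD vars_ j 0
      let adj := adj.modify a [] (fun s => PySem.Set.add s b)
      adj.modify b [] (fun s => PySem.Set.add s a)) adj) adj

def pvBuildVig (n : Int) (clauses : List (List (Int × Int))) : PySem.Dict Int (PySem.Set Int) :=
  clauses.foldl pvBuildVigStep (PySem.Dict.mk [])

-- vig_edges: the set {(v,u) | v in range(n), u in adj.get(v, set()), v < u}, then sorted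
def pvVigEdgesSet (adj : PySem.Dict Int (PySem.Set Int)) (n : Int) : PySem.Set (Int × Int) :=
  (PySem.List.pyRange 0 n 1).foldl (fun edges v =>
    (adj.getD v []).foldl (fun edges u =>
      if v < u then PySem.Set.add edges (v, u) else edges) edges) []

def pvVigEdges (adj : PySem.Dict Int (PySem.Set Int)) (n : Int) : List (Int × Int) :=
  PySem.List.sorted2 (pvVigEdgesSet adj n) Prod.fst Prod.snd

-- UnionFind.find with path compression (fuel = len(parent); Python terminates within
-- that many iterations on every state the algorithm reaches)
def pvUfFind (fuel : Nat) (p : List Int) (x : Int) : Int × List Int :=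
  match fuel with
  | 0 => (x, p)
  | fuel + 1 =>
    if PySem.List.pyGetD p x 0 = x then (x, p)
    else
      let ppx := PySem.List.pyGetD p (PySem.List.pyGetD p x 0) 0
      let p' := PySem.List.pySetD p x ppx
      pvUfFind fuel p' ppx

-- UnionFind.union (the returned bool is discarded by beta1_simplicial, so omitted)
def pvUfUnion (p rank : List Int) (x y : Int) : List Int × List Int :=
  let fx := pvUfFind p.length p x
  let rx := fx.1
  let fy := pvUfFind fx.2.length fx.2 y
  let ry := fy.1
  let p := fy.2
  if rx = ry then (p, rank)
  else
    let rxy := if PySem.List.pyGetD rank rx 0 < PySem.List.pyGetD rank ry 0 then (ry, rx) else (rx, ry)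
    let p := PySem.List.pySetD p rxy.2 rxy.1
    let rank := if PySem.List.pyGetD rank rxy.1 0 = PySem.List.pyGetD rank rxy.2 0
      then PySem.List.pySetD rank rxy.1 (PySem.List.pyGetD rank rxy.1 0 + 1) else rank
    (p, rank)

def beta1_simplicial (n : Int) (clauses : List (List (Int × Int))) : Int :=
  let adj := pvBuildVig n clauses
  let edges := pvVigEdges adj n
  let p0 := PySem.List.pyRange 0 n 1          -- list(range(n))
  let rank0 : List Int := List.replicate n.toNat 0   -- [0] * n
  let pr := edges.foldl (fun (pr : List Int × List Int) e => pvUfUnion pr.1 pr.2 e.1 e.2) (p0, rank0)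
  let st := (PySem.List.pyRange 0 n 1).foldl
    (fun (st : PySem.Set Int × List Int) i =>
      let f := pvUfFind st.2.length st.2 i
      (PySem.Set.add st.1 f.1, f.2)) (([] : PySem.Set Int), pr.1)
  let components : Int := st.1.length
  let n_filled : Int := PySem.List.len clauses
  let beta1 := PySem.List.len edges - n + components - n_filled
  max beta1 0

-- ===== PORT B =====
def pvAltClauseStep (n : Int) (edges : PySem.Set (Int × Int)) (clause : List (Int × Int)) :
    PySem.Set (Int × Int) :=
  let vs : List Int := [(PySem.List.pyGetD clause 0 (0, 0)).1, (PySem.List.pyGetD clause 1 (0, 0)).1,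
                        (PySem.List.pyGetD clause 2 (0, 0)).1]
  (PySem.List.pyRange 0 3 1).foldl (fun edges i =>
    (PySem.List.pyRange (i + 1) 3 1).foldl (fun edges j =>
      let a := PySem.List.pyGetD vs i 0
      let b := PySem.List.pyGetD vs j 0
      let ab := if a > b then (b, a) else (a, b)
      if 0 ≤ ab.1 ∧ ab.1 < ab.2 ∧ ab.2 < n then PySem.Set.add edges ab else edges) edges) edges

def pvAltEdges (n : Int) (clauses : List (List (Int × Int))) : PySem.Set (Int × Int) :=
  clauses.foldl (pvAltClauseStep n) []

def pvMergeStep (comps : List (PySem.Set Int)) (e : Int × Int) : List (PySem.Set Int) :=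
  let touching := comps.filter (fun c => PySem.Set.contains c e.1 || PySem.Set.contains c e.2)
  let rest := comps.filter (fun c => !PySem.Set.contains c e.1 && !PySem.Set.contains c e.2)
  let merged := touching.foldl (fun m c => PySem.Set.union m c) (PySem.Set.ofList [e.1, e.2])
  rest ++ [merged]

def beta1_simplicial_alt (n : Int) (clauses : List (List (Int × Int))) : Int :=
  let edges := pvAltEdges n clauses
  let comps := (PySem.List.sorted2 edges Prod.fst Prod.snd).foldl pvMergeStep []
  let isolated : Int :=
    ((PySem.List.pyRange 0 n 1).countP (fun v => comps.all (fun c => !PySem.Set.contains c v)) : Nat)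
  let components : Int := comps.length + isolated
  max (PySem.Set.len edges - n + components - PySem.List.len clauses) 0

-- ===== PRECONDITION & SPEC =====
-- k-th variable of a clause (0 for a missing position; Pre_ guarantees 3 are present)
def pvVar (clause : List (Int × Int)) (k : Nat) : Int := ((clause.map Prod.fst).getD k 0)

-- a pair of variables that would give UnionFind an index out of range(n): A raises there
def pvBadPair (n a b : Int) : Prop := 0 ≤ min a b ∧ min a b < n ∧ n ≤ max a b

-- Pre_ excludes exactly the inputs where the Python A raises IndexError: a clause with
-- fewer than 3 literals (vars_[i]), or a clause pairing a variable in range(n) with a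
-- variable ≥ n (UnionFind indexing out of range).
def Pre_beta1_simplicial (n : Int) (clauses : List (List (Int × Int))) : Prop :=
  ∀ clause ∈ clauses, 3 ≤ clause.length ∧
    ¬ pvBadPair n (pvVar clause 0) (pvVar clause 1) ∧
    ¬ pvBadPair n (pvVar clause 0) (pvVar clause 2) ∧
    ¬ pvBadPair n (pvVar clause 1) (pvVar clause 2)

instance (n : Int) (clauses : List (List (Int × Int))) : Decidable (Pre_beta1_simplicial n clauses) := by
  unfold Pre_beta1_simplicial pvBadPair pvVar; infer_instance

def pvWitness_beta1_simplicial : Int × (List (List (Int × Int))) :=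
  (3, [[(0, 1), (1, 0), (2, 1)], [(0, 1), (2, 0), (0, 1)]])

def Spec_beta1_simplicial (n : Int) (clauses : List (List (Int × Int))) (out : Int) : Prop :=
  out = beta1_simplicial_alt n clauses
instance (n : Int) (clauses : List (List (Int × Int))) (out : Int) : Decidable (Spec_beta1_simplicial n clauses out) := by
  unfold Spec_beta1_simplicial; infer_instance

-- ===== CLAIM (what is proved, stated in full; the proofs are below) =====
def Claim_equal_beta1_simplicial : Prop := ∀ (n : Int) (clauses : List (List (Int × Int))), Dom_beta1_simplicial n clauses → Pre_beta1_simplicial n clauses → Spec_beta1_simplicial n clauses (beta1_simplicial n clauses)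

-- ===== LEMMAS AND PROOFS =====

-- ---- the parent-pointer forest, abstractly ----
def pvStep (p : List Int) (x : Int) : Int := PySem.List.pyGetD p x 0

def pvIter (p : List Int) : Nat → Int → Int
  | 0, x => x
  | k + 1, x => pvIter p k (pvStep p x)

def pvIsRoot (p : List Int) (r : Int) : Prop := pvStep p r = r

def pvInR (p : List Int) (x : Int) : Prop := 0 ≤ x ∧ x < (p.length : Int)

def pvGood (p : List Int) : Prop :=
  (∀ x, pvInR p x → pvInR p (pvStep p x)) ∧
  (∀ x, pvInR p x → ∃ k, pvIsRoot p (pvIter p k x))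

def pvRoot (p : List Int) (x : Int) : Int := pvIter p p.length x

def pvSameComp (comps : List (PySem.Set Int)) (a b : Int) : Prop :=
  a = b ∨ ∃ c ∈ comps, a ∈ c ∧ b ∈ c

def pvCompsOK (n : Int) (comps : List (PySem.Set Int)) : Prop :=
  (∀ c ∈ comps, c ≠ [] ∧ c.Nodup ∧ ∀ x ∈ c, 0 ≤ x ∧ x < n) ∧
  comps.Pairwise (fun c c' => ∀ x, x ∈ c → x ∉ c')

-- pair predicates for the edge sets
def pvPairIn (cl : List (Int × Int)) (v u : Int) : Prop :=
  ((pvVar cl 0 = v ∧ pvVar cl 1 = u) ∨ (pvVar cl 1 = v ∧ pvVar cl 0 = u)) ∨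
  ((pvVar cl 0 = v ∧ pvVar cl 2 = u) ∨ (pvVar cl 2 = v ∧ pvVar cl 0 = u)) ∨
  ((pvVar cl 1 = v ∧ pvVar cl 2 = u) ∨ (pvVar cl 2 = v ∧ pvVar cl 1 = u))

def pvAdjRel (clauses : List (List (Int × Int))) (v u : Int) : Prop :=
  ∃ cl ∈ clauses, pvPairIn cl v u

def pvLexLe (a b : Int × Int) : Prop := a.1 < b.1 ∨ (a.1 = b.1 ∧ a.2 ≤ b.2)

-- iteration basics
theorem pvIter_add (p : List Int) (k m : Nat) (x : Int) :
    pvIter p (k + m) x = pvIter p m (pvIter p k x) := by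
  induction k generalizing x with
  | zero => simp [pvIter]
  | succ k ih =>
    have : k + 1 + m = (k + m) + 1 := by omega
    rw [this]
    show pvIter p (k + m) (pvStep p x) = pvIter p m (pvIter p k (pvStep p x))
    exact ih (pvStep p x)

theorem pvIter_succ' (p : List Int) (k : Nat) (x : Int) :
    pvIter p (k + 1) x = pvStep p (pvIter p k x) := by
  induction k generalizing x with
  | zero => rfl
  | succ k ih =>
    show pvIter p (k + 1) (pvStep p x) = pvStep p (pvIter p (k + 1) x)
    rw [ih (pvStep p x)]
    rfl

theorem pvIsRoot_iter (p : List Int) {r : Int} (h : pvIsRoot p r) (k : Nat) :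
    pvIter p k r = r := by
  induction k with
  | zero => rfl
  | succ k ih => rw [pvIter_succ', ih, h]

theorem pvInR_iter (p : List Int) (hg : pvGood p) {x : Int} (hx : pvInR p x) (k : Nat) :
    pvInR p (pvIter p k x) := by
  induction k with
  | zero => exact hx
  | succ k ih => rw [pvIter_succ']; exact hg.1 _ ih

theorem pvNoCycle (p : List Int) (hg : pvGood p) {x : Int} (hx : pvInR p x) {m : Nat}
    (hm : 0 < m) (hc : pvIter p m x = x) : pvIsRoot p x := by
  obtain ⟨k, hk⟩ := hg.2 x hx
  have hper : ∀ t : Nat, pvIter p (t * m) x = x := by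
    intro t
    induction t with
    | zero => rw [Nat.zero_mul]; rfl
    | succ t ih =>
      have : (t + 1) * m = t * m + m := by ring
      rw [this, pvIter_add, ih, hc]
  have hge : k ≤ (k + 1) * m := by nlinarith
  have h1 : pvIter p ((k + 1) * m) x = pvIter p k x := by
    have : (k + 1) * m = k + ((k + 1) * m - k) := by omega
    rw [this, pvIter_add, pvIsRoot_iter p hk]
  have h2 : x = pvIter p k x := by
    conv_lhs => rw [← hper (k + 1)]
    exact h1
  have := hk
  rwa [← h2] at this

theorem pvReachMin (p : List Int) (hg : pvGood p) {x : Int} (hx : pvInR p x) :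
    ∃ K, pvIsRoot p (pvIter p K x) ∧ ∀ m < K, ¬ pvIsRoot p (pvIter p m x) := by
  obtain ⟨k, hk⟩ := hg.2 x hx
  have hdec : DecidablePred fun k => pvIsRoot p (pvIter p k x) := fun k => by
    unfold pvIsRoot; infer_instance
  have hex : ∃ k, pvIsRoot p (pvIter p k x) := ⟨k, hk⟩
  exact ⟨Nat.find hex, Nat.find_spec hex, fun m hm => Nat.find_min hex hm⟩

theorem pvDistLt (p : List Int) (hg : pvGood p) {x : Int} (hx : pvInR p x) {K : Nat}
    (hK : pvIsRoot p (pvIter p K x)) (hmin : ∀ m < K, ¬ pvIsRoot p (pvIter p m x)) :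
    K < p.length := by
  -- the iterates 0..K are pairwise distinct values in range(p.length)
  have hinj : ∀ i j : Nat, i < j → j ≤ K → pvIter p i x ≠ pvIter p j x := by
    intro i j hij hjK heq
    have hper : ∀ t : Nat, pvIter p (i + t * (j - i)) x = pvIter p i x := by
      intro t
      induction t with
      | zero => simp
      | succ t ih =>
        have : i + (t + 1) * (j - i) = (i + t * (j - i)) + (j - i) := by ring
        rw [this, pvIter_add, ih, show pvIter p (j - i) (pvIter p i x) = pvIter p j x from by
          rw [← pvIter_add]; congr 1; omega]
        exact heq.symm
    have hd : 0 < j - i := by omega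
    have hbig : K ≤ i + (K + 1) * (j - i) := by nlinarith
    have hroot : pvIsRoot p (pvIter p i x) := by
      have h1 : pvIter p (i + (K + 1) * (j - i)) x = pvIter p K x := by
        have : i + (K + 1) * (j - i) = K + (i + (K + 1) * (j - i) - K) := by omega
        rw [this, pvIter_add, pvIsRoot_iter p hK]
      have := hper (K + 1)
      rw [h1] at this
      rw [← this]
      exact hK
    exact hmin i (by omega) hroot
  have hmaps : ∀ i : Fin (K + 1), (pvIter p i x).toNat < p.length := by
    intro i
    have := pvInR_iter p hg hx i
    unfold pvInR at this
    omega
  have hcard := Fintype.card_le_of_injective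
    (fun i : Fin (K + 1) => (⟨(pvIter p i x).toNat, hmaps i⟩ : Fin p.length))
    (by
      intro i j hij
      by_contra hne
      have hne' : (i : Nat) ≠ (j : Nat) := fun h => hne (Fin.ext h)
      rcases Nat.lt_or_ge i j with h | h
      · have := hinj i j h (by omega)
        have hi := (pvInR_iter p hg hx i).1
        have hj := (pvInR_iter p hg hx j).1
        apply this
        have : (pvIter p (i : Nat) x).toNat = (pvIter p (j : Nat) x).toNat := congrArg Fin.val hij
        omega
      · have hlt : (j : Nat) < (i : Nat) := by omega
        have := hinj j i hlt (by omega)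
        have hi := (pvInR_iter p hg hx i).1
        have hj := (pvInR_iter p hg hx j).1
        apply this
        have : (pvIter p (i : Nat) x).toNat = (pvIter p (j : Nat) x).toNat := congrArg Fin.val hij
        omega)
  simpa using hcard

theorem pvRoot_eq_of (p : List Int) (hg : pvGood p) {x r : Int} (hx : pvInR p x) (k : Nat)
    (hk : pvIter p k x = r) (hr : pvIsRoot p r) : pvRoot p x = r := by
  obtain ⟨K, hK, hmin⟩ := pvReachMin p hg hx
  have hKlt : K < p.length := pvDistLt p hg hx hK hmin
  have hroot : pvRoot p x = pvIter p K x := by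
    unfold pvRoot
    have : p.length = K + (p.length - K) := by omega
    rw [this, pvIter_add, pvIsRoot_iter p hK]
  have hkK : K ≤ k := by
    by_contra h
    exact hmin k (by omega) (by rw [hk]; exact hr)
  have : r = pvIter p K x := by
    rw [← hk, show k = K + (k - K) from by omega, pvIter_add, pvIsRoot_iter p hK]
  rw [hroot, this]

theorem pvRoot_spec (p : List Int) (hg : pvGood p) {x : Int} (hx : pvInR p x) :
    pvIsRoot p (pvRoot p x) := by
  obtain ⟨K, hK, hmin⟩ := pvReachMin p hg hx
  have h := pvRoot_eq_of p hg hx K rfl hK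
  rw [h]
  exact hK

theorem pvRoot_inR (p : List Int) (hg : pvGood p) {x : Int} (hx : pvInR p x) :
    pvInR p (pvRoot p x) := pvInR_iter p hg hx p.length

theorem pvRoot_root (p : List Int) (hg : pvGood p) {x : Int} (hx : pvInR p x) :
    pvRoot p (pvRoot p x) = pvRoot p x :=
  pvRoot_eq_of p hg (pvRoot_inR p hg hx) 0 rfl (pvRoot_spec p hg hx)

theorem pvRoot_of_isRoot (p : List Int) (hg : pvGood p) {r : Int} (hr : pvIsRoot p r)
    (hir : pvInR p r) : pvRoot p r = r :=
  pvRoot_eq_of p hg hir 0 rfl hr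

theorem pvRoot_iter (p : List Int) (hg : pvGood p) {x : Int} (hx : pvInR p x) (m : Nat) :
    pvRoot p (pvIter p m x) = pvRoot p x := by
  obtain ⟨K, hK, hmin⟩ := pvReachMin p hg hx
  have hroot : pvRoot p x = pvIter p K x := pvRoot_eq_of p hg hx K rfl hK
  rcases Nat.le_total m K with h | h
  · refine pvRoot_eq_of p hg (pvInR_iter p hg hx m) (K - m) ?_ (pvRoot_spec p hg hx)
    rw [← pvIter_add, show m + (K - m) = K from by omega, hroot]
  · have : pvIter p m x = pvIter p K x := by
      rw [show m = K + (m - K) from by omega, pvIter_add, pvIsRoot_iter p hK]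
    rw [this, ← hroot, pvRoot_root p hg hx]

theorem pvStep_set (p : List Int) {x : Int} (hx : pvInR p x) (v y : Int) (hy : 0 ≤ y) :
    pvStep (PySem.List.pySetD p x v) y = if y = x then v else pvStep p y := by
  obtain ⟨hx0, hxl⟩ := hx
  unfold pvStep
  rw [PySem.List.pySetD_of_nonneg p v hx0]
  by_cases hlt : y < (p.length : Int)
  · rw [PySem.List.pyGetD_eq_getElem (p.set x.toNat v) 0 hy (by simpa using hlt),
        PySem.List.pyGetD_eq_getElem p 0 hy hlt]
    rw [List.getElem_set]
    split_ifs with h1 h2 h2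
    · rfl
    · exact absurd (by omega : y = x) h2
    · exact absurd (by omega : (x.toNat : Nat) = y.toNat) h1
    · rfl
  · have hyx : y ≠ x := by omega
    rw [if_neg hyx]
    unfold PySem.List.pyGetD
    rw [PySem.List.pyGet?_of_nonneg (p.set x.toNat v) hy,
        PySem.List.pyGet?_of_nonneg p hy]
    rw [List.getElem?_eq_none (by simp; omega), List.getElem?_eq_none (by omega)]


theorem pvInR_congr {p q : List Int} (h : p.length = q.length) (y : Int) :
    pvInR p y ↔ pvInR q y := by unfold pvInR; rw [h]

-- path-compression step: parent[x] := parent[parent[x]] keeps every root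
theorem pvCompress (p : List Int) (hg : pvGood p) {x : Int} (hx : pvInR p x)
    (hnr : ¬ pvIsRoot p x) :
    (PySem.List.pySetD p x (pvIter p 2 x)).length = p.length ∧
    pvGood (PySem.List.pySetD p x (pvIter p 2 x)) ∧
    (∀ m, pvIter (PySem.List.pySetD p x (pvIter p 2 x)) m (pvIter p 2 x) = pvIter p m (pvIter p 2 x)) ∧
    (∀ y, pvInR p y → pvRoot (PySem.List.pySetD p x (pvIter p 2 x)) y = pvRoot p y) := by
  set z := pvIter p 2 x with hz
  set p' := PySem.List.pySetD p x z with hp'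
  have hlen : p'.length = p.length := by
    rw [hp', PySem.List.pySetD_of_nonneg p z hx.1, List.length_set]
  have hzin : pvInR p z := pvInR_iter p hg hx 2
  have hstep' : ∀ y, 0 ≤ y → pvStep p' y = if y = x then z else pvStep p y :=
    fun y hy => pvStep_set p hx z y hy
  have havoid : ∀ m, pvIter p m z ≠ x := by
    intro m hcon
    apply hnr
    refine pvNoCycle p hg hx (m := m + 2) (by omega) ?_
    rw [show m + 2 = 2 + m from by omega, pvIter_add, ← hz]
    exact hcon
  have hchain : ∀ m, pvIter p' m z = pvIter p m z := by
    intro m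
    induction m with
    | zero => rfl
    | succ m ih =>
      rw [pvIter_succ', pvIter_succ', ih, hstep' _ (pvInR_iter p hg hzin m).1,
        if_neg (havoid m)]
  have hrootkeep : ∀ r, pvIsRoot p r → 0 ≤ r → pvIsRoot p' r := by
    intro r hr hr0
    have hrx : r ≠ x := fun h => hnr (h ▸ hr)
    show pvStep p' r = r
    rw [hstep' r hr0, if_neg hrx, hr]
  have htrans : ∀ K y, pvInR p y → pvIsRoot p (pvIter p K y) →
      ∃ m, pvIter p' m y = pvIter p K y := by
    intro K
    induction K using Nat.strong_induction_on with
    | _ K ih =>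
      intro y hy hroot
      by_cases hyx : y = x
      · subst hyx
        match K, hroot with
        | 0, hroot => exact absurd hroot hnr
        | 1, hroot =>
          refine ⟨1, ?_⟩
          have hzz : z = pvStep p y := hroot
          show pvStep p' y = pvIter p 1 y
          rw [hstep' y hy.1, if_pos rfl, hzz]
          rfl
        | (K+2), hroot =>
          have hroot' : pvIsRoot p (pvIter p K z) := by
            rw [show K + 2 = 2 + K from by omega, pvIter_add, ← hz] at hroot
            exact hroot
          obtain ⟨m, hm⟩ := ih K (by omega) z hzin hroot'
          refine ⟨m + 1, ?_⟩
          show pvIter p' m (pvStep p' y) = pvIter p (K+2) y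
          rw [hstep' y hy.1, if_pos rfl, hm,
            show K + 2 = 2 + K from by omega, pvIter_add, ← hz]
      · match K, hroot with
        | 0, _ => exact ⟨0, rfl⟩
        | (K+1), hroot =>
          have hroot' : pvIsRoot p (pvIter p K (pvStep p y)) := hroot
          obtain ⟨m, hm⟩ := ih K (by omega) (pvStep p y) (hg.1 y hy) hroot'
          refine ⟨m + 1, ?_⟩
          show pvIter p' m (pvStep p' y) = pvIter p (K+1) y
          rw [hstep' y hy.1, if_neg hyx, hm]
          rfl
  have hGood' : pvGood p' := by
    constructor
    · intro y hy
      have hy' : pvInR p y := (pvInR_congr hlen y).mp hy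
      rw [pvInR_congr hlen, hstep' y hy'.1]
      split_ifs
      · exact hzin
      · exact hg.1 y hy'
    · intro y hy
      have hy' : pvInR p y := (pvInR_congr hlen y).mp hy
      obtain ⟨K, hK, _⟩ := pvReachMin p hg hy'
      obtain ⟨m, hm⟩ := htrans K y hy' hK
      refine ⟨m, ?_⟩
      show pvStep p' (pvIter p' m y) = pvIter p' m y
      rw [hm]
      exact hrootkeep _ hK (pvInR_iter p hg hy' K).1
  have hroots : ∀ y, pvInR p y → pvRoot p' y = pvRoot p y := by
    intro y hy
    obtain ⟨K, hK, _⟩ := pvReachMin p hg hy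
    obtain ⟨m, hm⟩ := htrans K y hy hK
    have h1 : pvRoot p y = pvIter p K y := pvRoot_eq_of p hg hy K rfl hK
    have h2 : pvRoot p' y = pvIter p K y :=
      pvRoot_eq_of p' hGood' ((pvInR_congr hlen y).mpr hy) m hm
        (hrootkeep _ hK (pvInR_iter p hg hy K).1)
    rw [h1, h2]
  exact ⟨hlen, hGood', hchain, hroots⟩

-- linking step: parent[ry] := rx rewires exactly the class of ry
theorem pvLink (p : List Int) (hg : pvGood p) {rx ry : Int} (hrx : pvIsRoot p rx)
    (hry : pvIsRoot p ry) (hirx : pvInR p rx) (hiry : pvInR p ry) (hne : rx ≠ ry) :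
    (PySem.List.pySetD p ry rx).length = p.length ∧
    pvGood (PySem.List.pySetD p ry rx) ∧
    (∀ y, pvInR p y → pvRoot (PySem.List.pySetD p ry rx) y =
      (if pvRoot p y = ry then rx else pvRoot p y)) := by
  set p' := PySem.List.pySetD p ry rx with hp'
  have hlen : p'.length = p.length := by
    rw [hp', PySem.List.pySetD_of_nonneg p rx hiry.1, List.length_set]
  have hstep' : ∀ y, 0 ≤ y → pvStep p' y = if y = ry then rx else pvStep p y :=
    fun y hy => pvStep_set p hiry rx y hy
  have hrootkeep : ∀ r, pvIsRoot p r → 0 ≤ r → r ≠ ry → pvIsRoot p' r := by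
    intro r hr hr0 hrry
    show pvStep p' r = r
    rw [hstep' r hr0, if_neg hrry, hr]
  have hrxroot' : pvIsRoot p' rx := hrootkeep rx hrx hirx.1 hne
  have htrans : ∀ K y, pvInR p y → pvIsRoot p (pvIter p K y) →
      ∃ m, pvIter p' m y = (if pvIter p K y = ry then rx else pvIter p K y) := by
    intro K
    induction K with
    | zero =>
      intro y hy hroot
      by_cases hyr : y = ry
      · subst hyr
        refine ⟨1, ?_⟩
        have h1 : pvIter p' 1 y = pvStep p' y := rfl
        rw [h1, hstep' y hy.1]
        simp [pvIter]
      · exact ⟨0, by simp [pvIter, hyr]⟩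
    | succ K ih =>
      intro y hy hroot
      by_cases hyroot : pvIsRoot p y
      · have hiter : pvIter p (K+1) y = y := pvIsRoot_iter p hyroot (K+1)
        rw [hiter]
        by_cases hyr : y = ry
        · subst hyr
          refine ⟨1, ?_⟩
          have h1 : pvIter p' 1 y = pvStep p' y := rfl
          rw [h1, hstep' y hy.1]
          simp
        · exact ⟨0, by simp [pvIter, hyr]⟩
      · have hyry : y ≠ ry := fun h => hyroot (h ▸ hry)
        obtain ⟨m, hm⟩ := ih (pvStep p y) (hg.1 y hy) hroot
        refine ⟨m + 1, ?_⟩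
        show pvIter p' m (pvStep p' y) = _
        rw [hstep' y hy.1, if_neg hyry, hm]
        rfl
  have hGood' : pvGood p' := by
    constructor
    · intro y hy
      have hy' : pvInR p y := (pvInR_congr hlen y).mp hy
      rw [pvInR_congr hlen, hstep' y hy'.1]
      split_ifs
      · exact hirx
      · exact hg.1 y hy'
    · intro y hy
      have hy' : pvInR p y := (pvInR_congr hlen y).mp hy
      obtain ⟨K, hK, _⟩ := pvReachMin p hg hy'
      obtain ⟨m, hm⟩ := htrans K y hy' hK
      refine ⟨m, ?_⟩
      show pvStep p' (pvIter p' m y) = pvIter p' m y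
      rw [hm]
      split_ifs with h
      · exact hrxroot'
      · exact hrootkeep _ hK (pvInR_iter p hg hy' K).1 h
  have hroots : ∀ y, pvInR p y → pvRoot p' y = (if pvRoot p y = ry then rx else pvRoot p y) := by
    intro y hy
    obtain ⟨K, hK, _⟩ := pvReachMin p hg hy
    obtain ⟨m, hm⟩ := htrans K y hy hK
    have h1 : pvRoot p y = pvIter p K y := pvRoot_eq_of p hg hy K rfl hK
    rw [h1]
    refine pvRoot_eq_of p' hGood' ((pvInR_congr hlen y).mpr hy) m hm ?_
    split_ifs with h
    · exact hrxroot'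
    · exact hrootkeep _ hK (pvInR_iter p hg hy K).1 h
  exact ⟨hlen, hGood', hroots⟩

theorem pvRootKeep {p q : List Int} (hg : pvGood p) (hgq : pvGood q)
    (hlen : q.length = p.length) (hroots : ∀ y, pvInR p y → pvRoot q y = pvRoot p y)
    {r : Int} (hr : pvIsRoot p r) (hir : pvInR p r) : pvIsRoot q r := by
  have h1 : pvRoot q r = r := by rw [hroots r hir, pvRoot_of_isRoot p hg hr hir]
  have h2 := pvRoot_spec q hgq ((pvInR_congr hlen r).mpr hir)
  rwa [h1] at h2

theorem pvUfFind_spec (fuel : Nat) (p : List Int) (hg : pvGood p) {x : Int} (hx : pvInR p x)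
    (hfuel : ∃ K < fuel, pvIsRoot p (pvIter p K x)) :
    (pvUfFind fuel p x).1 = pvRoot p x ∧
    (pvUfFind fuel p x).2.length = p.length ∧
    pvGood (pvUfFind fuel p x).2 ∧
    (∀ y, pvInR p y → pvRoot (pvUfFind fuel p x).2 y = pvRoot p y) := by
  induction fuel generalizing p x with
  | zero => obtain ⟨K, hK, _⟩ := hfuel; omega
  | succ fuel ih =>
    by_cases hroot : PySem.List.pyGetD p x 0 = x
    · have hred : pvUfFind (fuel+1) p x = (x, p) := by
        simp only [pvUfFind]
        rw [if_pos hroot]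
      have hxroot : pvIsRoot p x := hroot
      rw [hred]
      exact ⟨(pvRoot_of_isRoot p hg hxroot hx).symm, rfl, hg, fun y _ => rfl⟩
    · have hnr : ¬ pvIsRoot p x := hroot
      obtain ⟨hlen, hGood', hchain, hroots⟩ := pvCompress p hg hx hnr
      set z := pvIter p 2 x with hzdef
      set p' := PySem.List.pySetD p x z with hp'def
      have hred : pvUfFind (fuel+1) p x = pvUfFind fuel p' z := by
        simp only [pvUfFind]
        rw [if_neg hroot]
        rfl
      have hzin : pvInR p z := pvInR_iter p hg hx 2
      have hz'in : pvInR p' z := (pvInR_congr hlen z).mpr hzin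
      have keep : ∀ r, pvIsRoot p r → pvInR p r → pvIsRoot p' r :=
        fun r hr hir => pvRootKeep hg hGood' hlen hroots hr hir
      obtain ⟨K₀, hK₀, hmin₀⟩ := pvReachMin p hg hx
      have hK0fuel : K₀ < fuel + 1 := by
        obtain ⟨K, hKlt, hK⟩ := hfuel
        by_contra h
        exact hmin₀ K (by omega) hK
      have hfuel' : ∃ K < fuel, pvIsRoot p' (pvIter p' K z) := by
        rcases K₀ with _ | K₁
        · exact absurd hK₀ hnr
        · rcases K₁ with _ | K
          · -- K₀ = 1: step x is a root and z = step x
            have hsx : pvIsRoot p (pvIter p 1 x) := hK₀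
            have hz_eq : z = pvIter p 1 x := hsx
            have hz_root : pvIsRoot p z := by rw [hz_eq]; exact hsx
            exact ⟨0, by omega, keep z hz_root hzin⟩
          · -- K₀ = K + 2: the root is iter K z
            have hroot' : pvIsRoot p (pvIter p K z) := hK₀
            have hkeep := keep _ hroot' (pvInR_iter p hg hzin K)
            refine ⟨K, by omega, ?_⟩
            rw [hchain K]
            exact hkeep
      have hrec := ih p' hGood' hz'in hfuel'
      rw [hred]
      refine ⟨?_, ?_, hrec.2.2.1, ?_⟩
      · rw [hrec.1, hroots z hzin, hzdef, pvRoot_iter p hg hx 2]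
      · rw [hrec.2.1, hlen]
      · intro y hy
        rw [hrec.2.2.2 y ((pvInR_congr hlen y).mpr hy), hroots y hy]

theorem pvUfFind_spec' (p : List Int) (hg : pvGood p) {x : Int} (hx : pvInR p x) :
    (pvUfFind p.length p x).1 = pvRoot p x ∧
    (pvUfFind p.length p x).2.length = p.length ∧
    pvGood (pvUfFind p.length p x).2 ∧
    (∀ y, pvInR p y → pvRoot (pvUfFind p.length p x).2 y = pvRoot p y) := by
  obtain ⟨K, hK, hmin⟩ := pvReachMin p hg hx
  exact pvUfFind_spec p.length p hg hx ⟨K, pvDistLt p hg hx hK hmin, hK⟩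

theorem pvCollapse (RX RY RA RB : Int) (hne : RX ≠ RY) :
    ((if RA = RY then RX else RA) = (if RB = RY then RX else RB)) ↔
      (RA = RB ∨ (RA = RX ∧ RB = RY) ∨ (RA = RY ∧ RB = RX)) := by
  split_ifs <;> omega

theorem pvUfUnion_spec (p rank : List Int) (hg : pvGood p) {x y : Int} (hx : pvInR p x)
    (hy : pvInR p y) :
    (pvUfUnion p rank x y).1.length = p.length ∧
    pvGood (pvUfUnion p rank x y).1 ∧
    (∀ a b, pvInR p a → pvInR p b →
      (pvRoot (pvUfUnion p rank x y).1 a = pvRoot (pvUfUnion p rank x y).1 b ↔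
        (pvRoot p a = pvRoot p b ∨
         (pvRoot p a = pvRoot p x ∧ pvRoot p b = pvRoot p y) ∨
         (pvRoot p a = pvRoot p y ∧ pvRoot p b = pvRoot p x)))) := by
  obtain ⟨hrx, hlen1, hgood1, hroots1⟩ := pvUfFind_spec' p hg hx
  set f1 := pvUfFind p.length p x with hf1
  set p1 := f1.2 with hp1
  have hy1 : pvInR p1 y := (pvInR_congr hlen1 y).mpr hy
  obtain ⟨hry, hlen2, hgood2, hroots2⟩ := pvUfFind_spec' p1 hgood1 hy1
  set f2 := pvUfFind p1.length p1 y with hf2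
  set p2 := f2.2 with hp2
  have hlen2' : p2.length = p.length := by rw [hlen2, hlen1]
  have hroots2' : ∀ a, pvInR p a → pvRoot p2 a = pvRoot p a := by
    intro a ha
    rw [hroots2 a ((pvInR_congr hlen1 a).mpr ha), hroots1 a ha]
  have hrxv : f1.1 = pvRoot p x := hrx
  have hryv : f2.1 = pvRoot p y := by rw [hry, hroots1 y hy]
  have hred : pvUfUnion p rank x y =
      (if f1.1 = f2.1 then (p2, rank)
       else
        let rxy := if PySem.List.pyGetD rank f1.1 0 < PySem.List.pyGetD rank f2.1 0
          then (f2.1, f1.1) else (f1.1, f2.1)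
        let p3 := PySem.List.pySetD p2 rxy.2 rxy.1
        let rank' := if PySem.List.pyGetD rank rxy.1 0 = PySem.List.pyGetD rank rxy.2 0
          then PySem.List.pySetD rank rxy.1 (PySem.List.pyGetD rank rxy.1 0 + 1) else rank
        (p3, rank')) := by
    simp only [pvUfUnion]
    rfl
  by_cases heq : f1.1 = f2.1
  · rw [hred, if_pos heq]
    refine ⟨hlen2', hgood2, ?_⟩
    intro a b ha hb
    rw [hroots2' a ha, hroots2' b hb]
    have hxy : pvRoot p x = pvRoot p y := by rw [← hrxv, ← hryv, heq]
    constructor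
    · exact fun h => Or.inl h
    · rintro (h | ⟨h1, h2⟩ | ⟨h1, h2⟩)
      · exact h
      · rw [h1, h2, hxy]
      · rw [h1, h2, hxy]
  · -- linking
    have hRX : pvIsRoot p (pvRoot p x) := pvRoot_spec p hg hx
    have hRY : pvIsRoot p (pvRoot p y) := pvRoot_spec p hg hy
    have hiRX : pvInR p (pvRoot p x) := pvRoot_inR p hg hx
    have hiRY : pvInR p (pvRoot p y) := pvRoot_inR p hg hy
    have hRX2 : pvIsRoot p2 (pvRoot p x) := pvRootKeep hg hgood2 hlen2' hroots2' hRX hiRX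
    have hRY2 : pvIsRoot p2 (pvRoot p y) := pvRootKeep hg hgood2 hlen2' hroots2' hRY hiRY
    have hne : pvRoot p x ≠ pvRoot p y := by rw [← hrxv, ← hryv]; exact heq
    have hiRX2 : pvInR p2 (pvRoot p x) := (pvInR_congr hlen2' _).mpr hiRX
    have hiRY2 : pvInR p2 (pvRoot p y) := (pvInR_congr hlen2' _).mpr hiRY
    rw [hred, if_neg heq]
    by_cases hrk : PySem.List.pyGetD rank f1.1 0 < PySem.List.pyGetD rank f2.1 0
    · -- rxy = (ry, rx) : parent[rx] := ry
      obtain ⟨hlen3, hgood3, hroots3⟩ :=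
        pvLink p2 hgood2 hRY2 hRX2 hiRY2 hiRX2 (fun h => hne h.symm)
      rw [hrxv, hryv] at hrk
      simp only [hrxv, hryv, if_pos hrk]
      refine ⟨by rw [hlen3, hlen2'], hgood3, ?_⟩
      intro a b ha hb
      have ha2 : pvInR p2 a := (pvInR_congr hlen2' a).mpr ha
      have hb2 : pvInR p2 b := (pvInR_congr hlen2' b).mpr hb
      rw [hroots3 a ha2, hroots3 b hb2, hroots2' a ha, hroots2' b hb]
      rw [pvCollapse (pvRoot p y) (pvRoot p x) (pvRoot p a) (pvRoot p b) (fun h => hne h.symm)]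
      tauto
    · -- rxy = (rx, ry) : parent[ry] := rx
      obtain ⟨hlen3, hgood3, hroots3⟩ :=
        pvLink p2 hgood2 hRX2 hRY2 hiRX2 hiRY2 hne
      rw [hrxv, hryv] at hrk
      simp only [hrxv, hryv, if_neg hrk]
      refine ⟨by rw [hlen3, hlen2'], hgood3, ?_⟩
      intro a b ha hb
      have ha2 : pvInR p2 a := (pvInR_congr hlen2' a).mpr ha
      have hb2 : pvInR p2 b := (pvInR_congr hlen2' b).mpr hb
      rw [hroots3 a ha2, hroots3 b hb2, hroots2' a ha, hroots2' b hb]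
      rw [pvCollapse (pvRoot p x) (pvRoot p y) (pvRoot p a) (pvRoot p b) hne]

theorem pvMemFoldlUnion (l : List (PySem.Set Int)) (s : PySem.Set Int) (x : Int) :
    x ∈ l.foldl (fun m c => PySem.Set.union m c) s ↔ x ∈ s ∨ ∃ c ∈ l, x ∈ c := by
  induction l generalizing s with
  | nil => simp
  | cons c l ih =>
    rw [List.foldl_cons, ih]
    rw [PySem.Set.mem_union]
    constructor
    · rintro ((h | h) | ⟨c', hc', hx⟩)
      · exact Or.inl h
      · exact Or.inr ⟨c, List.mem_cons_self .., h⟩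
      · exact Or.inr ⟨c', List.mem_cons_of_mem _ hc', hx⟩
    · rintro (h | ⟨c', hc', hx⟩)
      · exact Or.inl (Or.inl h)
      · rcases List.mem_cons.mp hc' with h' | h'
        · exact Or.inl (Or.inr (h' ▸ hx))
        · exact Or.inr ⟨c', h', hx⟩

theorem pvNodupFoldlUnion (l : List (PySem.Set Int)) (s : PySem.Set Int) (hs : s.Nodup) :
    (l.foldl (fun m c => PySem.Set.union m c) s).Nodup := by
  induction l generalizing s with
  | nil => exact hs
  | cons c l ih => exact ih _ (PySem.Set.nodup_union _ c hs)

theorem pvSC_symm {comps : List (PySem.Set Int)} {x y : Int}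
    (h : pvSameComp comps x y) : pvSameComp comps y x := by
  rcases h with h | ⟨c, hc, hx, hy⟩
  · exact Or.inl h.symm
  · exact Or.inr ⟨c, hc, hy, hx⟩

theorem pvSC_trans_common {n : Int} {comps : List (PySem.Set Int)} (hok : pvCompsOK n comps)
    {x y a : Int} (hx : pvSameComp comps x a) (hy : pvSameComp comps y a) :
    pvSameComp comps x y := by
  have hdisj : ∀ c ∈ comps, ∀ c' ∈ comps, c ≠ c' → ∀ z, z ∈ c → z ∉ c' := by
    intro c hc c' hc' hne
    exact List.Pairwise.forall (fun c c' (h : ∀ z, z ∈ c → z ∉ c') z hz hz' => h z hz' hz)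
      hok.2 hc hc' hne
  rcases hx with hx | ⟨c1, hc1, hxc, hac⟩
  · subst hx
    exact pvSC_symm hy
  · rcases hy with hy | ⟨c2, hc2, hyc, hac2⟩
    · subst hy
      exact Or.inr ⟨c1, hc1, hxc, hac⟩
    · by_cases hcc : c1 = c2
      · exact Or.inr ⟨c1, hc1, hxc, hcc ▸ hyc⟩
      · exact absurd hac2 (hdisj c1 hc1 c2 hc2 hcc a hac)

theorem pvMergeStep_spec (n : Int) (comps : List (PySem.Set Int)) (hok : pvCompsOK n comps)
    {a b : Int} (ha : 0 ≤ a) (hab : a < b) (hb : b < n) :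
    pvCompsOK n (pvMergeStep comps (a, b)) ∧
    (∀ x y, pvSameComp (pvMergeStep comps (a, b)) x y ↔
      (pvSameComp comps x y ∨
       (pvSameComp comps x a ∧ pvSameComp comps y b) ∨
       (pvSameComp comps x b ∧ pvSameComp comps y a))) := by
  have hdisj : ∀ c ∈ comps, ∀ c' ∈ comps, c ≠ c' → ∀ z, z ∈ c → z ∉ c' := by
    intro c hc c' hc' hne
    exact List.Pairwise.forall (fun c c' (h : ∀ z, z ∈ c → z ∉ c') z hz hz' => h z hz' hz)
      hok.2 hc hc' hne
  unfold pvMergeStep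
  set touching := comps.filter (fun c => PySem.Set.contains c a || PySem.Set.contains c b) with htou
  set rest := comps.filter (fun c => !PySem.Set.contains c a && !PySem.Set.contains c b) with hrest
  set merged := touching.foldl (fun m c => PySem.Set.union m c) (PySem.Set.ofList [a, b]) with hmer
  have hmem_tou : ∀ c, c ∈ touching ↔ c ∈ comps ∧ (a ∈ c ∨ b ∈ c) := by
    intro c
    rw [htou, List.mem_filter]
    simp [PySem.Set.contains_iff]
  have hmem_rest : ∀ c, c ∈ rest ↔ c ∈ comps ∧ a ∉ c ∧ b ∉ c := by
    intro c
    rw [hrest, List.mem_filter]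
    simp [PySem.Set.contains_iff]
  have hmem_merged : ∀ x, x ∈ merged ↔ pvSameComp comps x a ∨ pvSameComp comps x b := by
    intro x
    rw [hmer, pvMemFoldlUnion]
    constructor
    · rintro (h | ⟨c, hc, hx⟩)
      · rw [PySem.Set.mem_ofList] at h
        simp only [List.mem_cons, List.mem_singleton, List.not_mem_nil, or_false] at h
        rcases h with h | h
        · exact Or.inl (Or.inl h)
        · exact Or.inr (Or.inl h)
      · rcases ((hmem_tou c).mp hc).2 with h | h
        · exact Or.inl (Or.inr ⟨c, ((hmem_tou c).mp hc).1, hx, h⟩)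
        · exact Or.inr (Or.inr ⟨c, ((hmem_tou c).mp hc).1, hx, h⟩)
    · have hmab : ∀ z, z = a ∨ z = b → z ∈ PySem.Set.ofList [a, b] := by
        intro z hz
        rw [PySem.Set.mem_ofList]
        simpa using hz
      rintro ((h | ⟨c, hc, hx, hac⟩) | (h | ⟨c, hc, hx, hbc⟩))
      · exact Or.inl (hmab x (Or.inl h))
      · exact Or.inr ⟨c, (hmem_tou c).mpr ⟨hc, Or.inl hac⟩, hx⟩
      · exact Or.inl (hmab x (Or.inr h))
      · exact Or.inr ⟨c, (hmem_tou c).mpr ⟨hc, Or.inr hbc⟩, hx⟩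
  have hamem : a ∈ merged := (hmem_merged a).mpr (Or.inl (Or.inl rfl))
  have hok' : pvCompsOK n (rest ++ [merged]) := by
    constructor
    · intro c hc
      rcases List.mem_append.mp hc with hc | hc
      · exact hok.1 c ((hmem_rest c).mp hc).1
      · rw [List.mem_singleton.mp hc]
        refine ⟨List.ne_nil_of_mem hamem, ?_, ?_⟩
        · exact pvNodupFoldlUnion _ _ (PySem.Set.nodup_ofList _)
        · intro x hx
          rcases (hmem_merged x).mp hx with h | h
          · rcases h with h | ⟨c', hc', hx', _⟩
            · subst h; omega
            · exact (hok.1 c' hc').2.2 x hx'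
          · rcases h with h | ⟨c', hc', hx', _⟩
            · subst h; omega
            · exact (hok.1 c' hc').2.2 x hx'
    · rw [List.pairwise_append]
      refine ⟨List.Pairwise.sublist List.filter_sublist hok.2, by simp, ?_⟩
      intro c hc c' hc' x hx
      rw [List.mem_singleton.mp hc']
      intro hxm
      obtain ⟨hcc, hac, hbc⟩ := (hmem_rest c).mp hc
      rcases (hmem_merged x).mp hxm with h | h
      · rcases h with h | ⟨c2, hc2, hx2, ha2⟩
        · exact hac (h ▸ hx)
        · by_cases he : c = c2
          · exact hac (he ▸ ha2)
          · exact hdisj c hcc c2 hc2 he x hx hx2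
      · rcases h with h | ⟨c2, hc2, hx2, hb2⟩
        · exact hbc (h ▸ hx)
        · by_cases he : c = c2
          · exact hbc (he ▸ hb2)
          · exact hdisj c hcc c2 hc2 he x hx hx2
  refine ⟨hok', ?_⟩
  intro x y
  constructor
  · rintro (h | ⟨c, hc, hx, hy⟩)
    · exact Or.inl (Or.inl h)
    · rcases List.mem_append.mp hc with hc | hc
      · exact Or.inl (Or.inr ⟨c, ((hmem_rest c).mp hc).1, hx, hy⟩)
      · rw [List.mem_singleton.mp hc] at hx hy
        rcases (hmem_merged x).mp hx with h1 | h1 <;> rcases (hmem_merged y).mp hy with h2 | h2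
        · exact Or.inl (pvSC_trans_common hok h1 h2)
        · exact Or.inr (Or.inl ⟨h1, h2⟩)
        · exact Or.inr (Or.inr ⟨h1, h2⟩)
        · exact Or.inl (pvSC_trans_common hok h1 h2)
  · have hmm : merged ∈ rest ++ [merged] := List.mem_append_right _ (List.mem_singleton.mpr rfl)
    rintro (h | ⟨h1, h2⟩ | ⟨h1, h2⟩)
    · rcases h with h | ⟨c, hc, hx, hy⟩
      · exact Or.inl h
      · by_cases htc : a ∈ c ∨ b ∈ c
        · refine Or.inr ⟨merged, hmm, ?_, ?_⟩
          · rcases htc with h' | h'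
            · exact (hmem_merged x).mpr (Or.inl (Or.inr ⟨c, hc, hx, h'⟩))
            · exact (hmem_merged x).mpr (Or.inr (Or.inr ⟨c, hc, hx, h'⟩))
          · rcases htc with h' | h'
            · exact (hmem_merged y).mpr (Or.inl (Or.inr ⟨c, hc, hy, h'⟩))
            · exact (hmem_merged y).mpr (Or.inr (Or.inr ⟨c, hc, hy, h'⟩))
        · push_neg at htc
          exact Or.inr ⟨c, List.mem_append_left _ ((hmem_rest c).mpr ⟨hc, htc.1, htc.2⟩), hx, hy⟩
    · exact Or.inr ⟨merged, hmm, (hmem_merged x).mpr (Or.inl h1),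
        (hmem_merged y).mpr (Or.inr h2)⟩
    · exact Or.inr ⟨merged, hmm, (hmem_merged x).mpr (Or.inr h1),
        (hmem_merged y).mpr (Or.inl h2)⟩

-- counting: distinct roots over range(n) = merged components + isolated vertices
theorem pvHeadI_mem (c : List Int) (hc : c ≠ []) : c.headI ∈ c := by
  cases c with
  | nil => exact absurd rfl hc
  | cons h t => exact List.mem_cons_self ..

theorem pvCount (n : Int) (p : List Int) (comps : List (PySem.Set Int)) (hg : pvGood p)
    (hlen : (p.length : Int) = max n 0) (hok : pvCompsOK n comps)
    (hiff : ∀ a b, pvInR p a → pvInR p b →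
      (pvRoot p a = pvRoot p b ↔ pvSameComp comps a b)) :
    ((PySem.Set.ofList ((PySem.List.pyRange 0 n 1).map (pvRoot p))).length : Int) =
      comps.length +
      ((PySem.List.pyRange 0 n 1).countP
        (fun v => comps.all (fun c => !PySem.Set.contains c v)) : Int) := by
  set rng := PySem.List.pyRange 0 n 1 with hrng
  set unc := fun v => comps.all (fun c => !PySem.Set.contains c v) with hunc
  have hmem_rng : ∀ v, v ∈ rng ↔ 0 ≤ v ∧ v < n := by
    intro v; rw [hrng, PySem.List.mem_pyRange_one]
  have hinr_of_rng : ∀ v, v ∈ rng → pvInR p v := by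
    intro v hv
    obtain ⟨h0, h1⟩ := (hmem_rng v).mp hv
    exact ⟨h0, by omega⟩
  have hinr_of_mem : ∀ c ∈ comps, ∀ x ∈ c, pvInR p x := by
    intro c hc x hx
    obtain ⟨h0, h1⟩ := (hok.1 c hc).2.2 x hx
    exact ⟨h0, by omega⟩
  have hrng_of_mem : ∀ c ∈ comps, ∀ x ∈ c, x ∈ rng := by
    intro c hc x hx
    exact (hmem_rng x).mpr ((hok.1 c hc).2.2 x hx)
  have hdisj : ∀ c ∈ comps, ∀ c' ∈ comps, c ≠ c' → ∀ z, z ∈ c → z ∉ c' := by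
    intro c hc c' hc' hne
    exact List.Pairwise.forall (fun c c' (h : ∀ z, z ∈ c → z ∉ c') z hz hz' => h z hz' hz)
      hok.2 hc hc' hne
  have huncv : ∀ v, unc v = true ↔ ∀ c ∈ comps, v ∉ c := by
    intro v
    rw [hunc]
    simp
  have hF1 : ∀ c ∈ comps, ∀ x ∈ c, pvRoot p x = pvRoot p c.headI := by
    intro c hc x hx
    have hhm : c.headI ∈ c := pvHeadI_mem c (hok.1 c hc).1
    exact (hiff x c.headI (hinr_of_mem c hc x hx) (hinr_of_mem c hc _ hhm)).mpr
      (Or.inr ⟨c, hc, hx, hhm⟩)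
  have hF2 : ∀ c ∈ comps, ∀ c' ∈ comps, pvRoot p c.headI = pvRoot p c'.headI → c = c' := by
    intro c hc c' hc' heq
    have hhm : c.headI ∈ c := pvHeadI_mem c (hok.1 c hc).1
    have hhm' : c'.headI ∈ c' := pvHeadI_mem c' (hok.1 c' hc').1
    have := (hiff c.headI c'.headI (hinr_of_mem c hc _ hhm) (hinr_of_mem c' hc' _ hhm')).mp heq
    by_contra hne
    rcases this with h | ⟨c2, hc2, h1, h2⟩
    · exact hdisj c hc c' hc' hne c.headI hhm (h ▸ hhm')
    · by_cases he1 : c = c2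
      · by_cases he2 : c' = c2
        · exact hne (he1.trans he2.symm)
        · exact hdisj c' hc' c2 hc2 he2 c'.headI hhm' h2
      · exact hdisj c hc c2 hc2 he1 c.headI hhm h1
  have hF3 : ∀ v ∈ rng, unc v = true → pvRoot p v = v := by
    intro v hv huv
    have hvin := hinr_of_rng v hv
    have heq : pvRoot p v = pvRoot p (pvRoot p v) := (pvRoot_root p hg hvin).symm
    have := (hiff v (pvRoot p v) hvin (pvRoot_inR p hg hvin)).mp heq
    rcases this with h | ⟨c, hc, h1, _⟩
    · exact h.symm
    · exact absurd h1 ((huncv v).mp huv c hc)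
  have hF4 : ∀ c ∈ comps, ∀ v ∈ rng, unc v = true → pvRoot p c.headI ≠ v := by
    intro c hc v hv huv heq
    have hhm : c.headI ∈ c := pvHeadI_mem c (hok.1 c hc).1
    have hroot_eq : pvRoot p c.headI = pvRoot p v := by rw [heq, hF3 v hv huv]
    have := (hiff c.headI v (hinr_of_mem c hc _ hhm) (hinr_of_rng v hv)).mp hroot_eq
    rcases this with h | ⟨c2, hc2, _, h2⟩
    · exact (huncv v).mp huv c hc (h ▸ hhm)
    · exact (huncv v).mp huv c2 hc2 h2
  have hcomps_nodup : comps.Nodup := by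
    refine List.Pairwise.imp_of_mem ?_ hok.2
    intro c c' hc hc' h
    intro he
    exact h c.headI (pvHeadI_mem c (hok.1 c hc).1) (he ▸ pvHeadI_mem c (hok.1 c hc).1)
  set R' := comps.map (fun c => pvRoot p c.headI) ++ rng.filter unc with hR'
  have hR'nodup : R'.Nodup := by
    rw [hR', List.nodup_append]
    refine ⟨?_, List.Nodup.filter _ (by rw [hrng]; exact PySem.List.nodup_pyRange_one ..), ?_⟩
    · exact List.Nodup.map_on (fun c hc c' hc' h => hF2 c hc c' hc' h) hcomps_nodup
    · intro y hy y' hy'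
      obtain ⟨c, hc, hcy⟩ := List.mem_map.mp hy
      obtain ⟨hyr, hyu⟩ := List.mem_filter.mp hy'
      intro he
      exact hF4 c hc y' hyr hyu (he ▸ hcy)
  have hmembers : ∀ y, y ∈ PySem.Set.ofList (rng.map (pvRoot p)) ↔ y ∈ R' := by
    intro y
    rw [PySem.Set.mem_ofList, List.mem_map, hR', List.mem_append]
    constructor
    · rintro ⟨v, hv, rfl⟩
      by_cases hcov : ∃ c ∈ comps, v ∈ c
      · obtain ⟨c, hc, hvc⟩ := hcov
        exact Or.inl (List.mem_map.mpr ⟨c, hc, (hF1 c hc v hvc).symm⟩)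
      · have huv : unc v = true := (huncv v).mpr (fun c hc hrv => hcov ⟨c, hc, hrv⟩)
        rw [hF3 v hv huv]
        exact Or.inr (List.mem_filter.mpr ⟨hv, huv⟩)
    · rintro (hy | hy)
      · obtain ⟨c, hc, rfl⟩ := List.mem_map.mp hy
        have hhm : c.headI ∈ c := pvHeadI_mem c (hok.1 c hc).1
        exact ⟨c.headI, hrng_of_mem c hc _ hhm, rfl⟩
      · obtain ⟨hyr, hyu⟩ := List.mem_filter.mp hy
        exact ⟨y, hyr, hF3 y hyr hyu⟩
  have hperm : (PySem.Set.ofList (rng.map (pvRoot p))).Perm R' :=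
    (List.perm_ext_iff_of_nodup (PySem.Set.nodup_ofList _) hR'nodup).mpr hmembers
  have hlen_eq := hperm.length_eq
  rw [hlen_eq, hR', List.length_append, List.length_map, List.countP_eq_length_filter]
  push_cast
  ring

-- the two edge sets agree under Pre_
theorem pvDmem (d : PySem.Dict Int (PySem.Set Int)) (a b v u : Int) :
    u ∈ ((d.modify a [] (fun s => PySem.Set.add s b)).modify b []
          (fun s => PySem.Set.add s a)).getD v [] ↔
      (u ∈ d.getD v [] ∨ (v = a ∧ u = b) ∨ (v = b ∧ u = a)) := by
  simp only [PySem.Dict.getD_modify]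
  by_cases hab : a = b <;> by_cases hvb : v = b <;> by_cases hva : v = a <;>
    simp [hva, hvb, hab, PySem.Set.mem_add, eq_comm (a := b) (b := a)] <;> tauto

theorem pvVarGetD (cl : List (Int × Int)) (k : Nat) :
    pvVar cl k = (cl.getD k ((0 : Int), (0 : Int))).1 := by
  unfold pvVar
  induction cl generalizing k with
  | nil => cases k <;> rfl
  | cons p cl ih =>
    cases k with
    | zero => rfl
    | succ k =>
      rw [List.map_cons, List.getD_cons_succ, List.getD_cons_succ]
      exact ih k

set_option maxHeartbeats 1600000 in
theorem pvBuildVigStep_mem (d : PySem.Dict Int (PySem.Set Int)) (cl : List (Int × Int))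
    (v u : Int) :
    u ∈ (pvBuildVigStep d cl).getD v [] ↔ u ∈ d.getD v [] ∨ pvPairIn cl v u := by
  have h03 : PySem.List.pyRange 0 3 1 = [0, 1, 2] := by decide
  have h13 : PySem.List.pyRange (0 + 1) 3 1 = [1, 2] := by decide
  have h23 : PySem.List.pyRange (1 + 1) 3 1 = [2] := by decide
  have h33 : PySem.List.pyRange (2 + 1) 3 1 = [] := by decide
  have hv0 : PySem.List.pyGetD (cl.map Prod.fst) (0 : Int) 0 = pvVar cl 0 := by
    rw [show (0 : Int) = ((0 : Nat) : Int) from rfl, PySem.List.pyGetD_natCast]; rfl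
  have hv1 : PySem.List.pyGetD (cl.map Prod.fst) (1 : Int) 0 = pvVar cl 1 := by
    rw [show (1 : Int) = ((1 : Nat) : Int) from rfl, PySem.List.pyGetD_natCast]; rfl
  have hv2 : PySem.List.pyGetD (cl.map Prod.fst) (2 : Int) 0 = pvVar cl 2 := by
    rw [show (2 : Int) = ((2 : Nat) : Int) from rfl, PySem.List.pyGetD_natCast]; rfl
  simp only [pvBuildVigStep, h03, h13, h23, h33, List.foldl_cons, List.foldl_nil]
  rw [pvDmem, pvDmem, pvDmem, hv0, hv1, hv2]
  unfold pvPairIn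
  tauto

theorem pvBuildVig_mem (n : Int) (clauses : List (List (Int × Int))) (v u : Int) :
    u ∈ (pvBuildVig n clauses).getD v [] ↔ pvAdjRel clauses v u := by
  have hgen : ∀ (d : PySem.Dict Int (PySem.Set Int)),
      u ∈ (clauses.foldl pvBuildVigStep d).getD v [] ↔
        u ∈ d.getD v [] ∨ pvAdjRel clauses v u := by
    intro d
    induction clauses generalizing d with
    | nil => simp [pvAdjRel]
    | cons cl cls ih =>
      rw [List.foldl_cons, ih, pvBuildVigStep_mem]
      unfold pvAdjRel
      constructor
      · rintro ((h | h) | ⟨c, hc, hp⟩)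
        · exact Or.inl h
        · exact Or.inr ⟨cl, List.mem_cons_self .., h⟩
        · exact Or.inr ⟨c, List.mem_cons_of_mem _ hc, hp⟩
      · rintro (h | ⟨c, hc, hp⟩)
        · exact Or.inl (Or.inl h)
        · rcases List.mem_cons.mp hc with h' | h'
          · exact Or.inl (Or.inr (h' ▸ hp))
          · exact Or.inr ⟨c, h', hp⟩
  unfold pvBuildVig
  rw [hgen]
  have hempty : (PySem.Dict.mk ([] : List (Int × PySem.Set Int))).getD v [] = [] := rfl
  rw [hempty]
  simp

theorem pvMemFoldlAddIf (l : List Int) (v : Int) (s : PySem.Set (Int × Int)) (e : Int × Int) :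
    e ∈ l.foldl (fun edges u => if v < u then PySem.Set.add edges (v, u) else edges) s ↔
      e ∈ s ∨ ∃ u ∈ l, v < u ∧ e = (v, u) := by
  induction l generalizing s with
  | nil => simp
  | cons u l ih =>
    rw [List.foldl_cons, ih]
    by_cases h : v < u
    · rw [if_pos h, PySem.Set.mem_add]
      constructor
      · rintro ((h1 | h1) | ⟨u', hu', h1, h2⟩)
        · exact Or.inl h1
        · exact Or.inr ⟨u, List.mem_cons_self .., h, h1⟩
        · exact Or.inr ⟨u', List.mem_cons_of_mem _ hu', h1, h2⟩
      · rintro (h1 | ⟨u', hu', h1, h2⟩)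
        · exact Or.inl (Or.inl h1)
        · rcases List.mem_cons.mp hu' with h' | h'
          · exact Or.inl (Or.inr (by rw [h2, h']))
          · exact Or.inr ⟨u', h', h1, h2⟩
    · rw [if_neg h]
      constructor
      · rintro (h1 | ⟨u', hu', h1, h2⟩)
        · exact Or.inl h1
        · exact Or.inr ⟨u', List.mem_cons_of_mem _ hu', h1, h2⟩
      · rintro (h1 | ⟨u', hu', h1, h2⟩)
        · exact Or.inl h1
        · rcases List.mem_cons.mp hu' with h' | h'
          · exact absurd (h' ▸ h1) h
          · exact Or.inr ⟨u', h', h1, h2⟩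

theorem pvNodupFoldlAddIf (l : List Int) (v : Int) (s : PySem.Set (Int × Int))
    (hs : s.Nodup) :
    (l.foldl (fun edges u => if v < u then PySem.Set.add edges (v, u) else edges) s).Nodup := by
  induction l generalizing s with
  | nil => exact hs
  | cons u l ih =>
    rw [List.foldl_cons]
    by_cases h : v < u
    · rw [if_pos h]; exact ih _ (PySem.Set.nodup_add _ _ hs)
    · rw [if_neg h]; exact ih _ hs

theorem pvVigEdgesSet_mem (adj : PySem.Dict Int (PySem.Set Int)) (n : Int) (e : Int × Int) :
    e ∈ pvVigEdgesSet adj n ↔ 0 ≤ e.1 ∧ e.1 < n ∧ e.1 < e.2 ∧ e.2 ∈ adj.getD e.1 [] := by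
  have hgen : ∀ (l : List Int) (s : PySem.Set (Int × Int)),
      e ∈ l.foldl (fun edges v =>
          (adj.getD v []).foldl (fun edges u =>
            if v < u then PySem.Set.add edges (v, u) else edges) edges) s ↔
        e ∈ s ∨ ∃ v ∈ l, ∃ u ∈ adj.getD v [], v < u ∧ e = (v, u) := by
    intro l
    induction l with
    | nil => simp
    | cons v l ih =>
      intro s
      rw [List.foldl_cons, ih, pvMemFoldlAddIf]
      constructor
      · rintro ((h1 | ⟨u, hu, h1, h2⟩) | ⟨v', hv', hrest⟩)
        · exact Or.inl h1
        · exact Or.inr ⟨v, List.mem_cons_self .., u, hu, h1, h2⟩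
        · exact Or.inr ⟨v', List.mem_cons_of_mem _ hv', hrest⟩
      · rintro (h1 | ⟨v', hv', u, hu, h1, h2⟩)
        · exact Or.inl (Or.inl h1)
        · rcases List.mem_cons.mp hv' with h' | h'
          · subst h'
            exact Or.inl (Or.inr ⟨u, hu, h1, h2⟩)
          · exact Or.inr ⟨v', h', u, hu, h1, h2⟩
  unfold pvVigEdgesSet
  rw [hgen]
  simp only [List.not_mem_nil, false_or]
  constructor
  · rintro ⟨v, hv, u, hu, h1, h2⟩
    rw [PySem.List.mem_pyRange_one] at hv
    subst h2
    exact ⟨hv.1, hv.2, h1, hu⟩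
  · rintro ⟨h0, h1, h2, h3⟩
    exact ⟨e.1, PySem.List.mem_pyRange_one.mpr ⟨h0, h1⟩, e.2, h3, h2, rfl⟩

theorem pvVigEdgesSet_nodup (adj : PySem.Dict Int (PySem.Set Int)) (n : Int) :
    (pvVigEdgesSet adj n).Nodup := by
  have hgen : ∀ (l : List Int) (s : PySem.Set (Int × Int)), s.Nodup →
      (l.foldl (fun edges v =>
          (adj.getD v []).foldl (fun edges u =>
            if v < u then PySem.Set.add edges (v, u) else edges) edges) s).Nodup := by
    intro l
    induction l with
    | nil => exact fun s hs => hs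
    | cons v l ih =>
      intro s hs
      rw [List.foldl_cons]
      exact ih _ (pvNodupFoldlAddIf _ _ _ hs)
  exact hgen _ _ List.nodup_nil

theorem pvAddPair (s : PySem.Set (Int × Int)) (n a b : Int) (e : Int × Int) :
    (e ∈ (if 0 ≤ (if a > b then (b, a) else (a, b)).1 ∧
            (if a > b then (b, a) else (a, b)).1 < (if a > b then (b, a) else (a, b)).2 ∧
            (if a > b then (b, a) else (a, b)).2 < n
          then PySem.Set.add s (if a > b then (b, a) else (a, b)) else s)) ↔
      e ∈ s ∨ (0 ≤ e.1 ∧ e.1 < e.2 ∧ e.2 < n ∧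
        ((e.1 = a ∧ e.2 = b) ∨ (e.1 = b ∧ e.2 = a))) := by
  rcases e with ⟨x, y⟩
  by_cases hab : a > b
  · rw [if_pos hab]
    by_cases hc : 0 ≤ (b, a).1 ∧ (b, a).1 < (b, a).2 ∧ (b, a).2 < n
    · rw [if_pos hc, PySem.Set.mem_add]
      simp only [Prod.mk.injEq]
      constructor
      · rintro (h | h)
        · exact Or.inl h
        · simp only at hc
          exact Or.inr (by omega)
      · rintro (h | h)
        · exact Or.inl h
        · simp only at hc ⊢
          right
          omega
    · rw [if_neg hc]
      constructor
      · exact fun h => Or.inl h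
      · rintro (h | h)
        · exact h
        · simp only at hc ⊢
          exfalso
          omega
  · rw [if_neg hab]
    by_cases hc : 0 ≤ (a, b).1 ∧ (a, b).1 < (a, b).2 ∧ (a, b).2 < n
    · rw [if_pos hc, PySem.Set.mem_add]
      simp only [Prod.mk.injEq]
      constructor
      · rintro (h | h)
        · exact Or.inl h
        · simp only at hc
          exact Or.inr (by omega)
      · rintro (h | h)
        · exact Or.inl h
        · simp only at hc ⊢
          right
          omega
    · rw [if_neg hc]
      constructor
      · exact fun h => Or.inl h
      · rintro (h | h)
        · exact h
        · simp only at hc ⊢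
          exfalso
          omega

theorem pvAltClauseStep_mem (n : Int) (edges : PySem.Set (Int × Int))
    (cl : List (Int × Int)) (e : Int × Int) :
    e ∈ pvAltClauseStep n edges cl ↔
      e ∈ edges ∨ (0 ≤ e.1 ∧ e.1 < e.2 ∧ e.2 < n ∧ pvPairIn cl e.1 e.2) := by
  have h03 : PySem.List.pyRange 0 3 1 = [0, 1, 2] := by decide
  have h13 : PySem.List.pyRange (0 + 1) 3 1 = [1, 2] := by decide
  have h23 : PySem.List.pyRange (1 + 1) 3 1 = [2] := by decide
  have h33 : PySem.List.pyRange (2 + 1) 3 1 = [] := by decide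
  have g0 : PySem.List.pyGetD [(PySem.List.pyGetD cl 0 ((0 : Int), (0 : Int))).1,
      (PySem.List.pyGetD cl 1 ((0 : Int), (0 : Int))).1,
      (PySem.List.pyGetD cl 2 ((0 : Int), (0 : Int))).1] (0 : Int) 0 =
      (PySem.List.pyGetD cl 0 ((0 : Int), (0 : Int))).1 := rfl
  have g1 : PySem.List.pyGetD [(PySem.List.pyGetD cl 0 ((0 : Int), (0 : Int))).1,
      (PySem.List.pyGetD cl 1 ((0 : Int), (0 : Int))).1,
      (PySem.List.pyGetD cl 2 ((0 : Int), (0 : Int))).1] (1 : Int) 0 =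
      (PySem.List.pyGetD cl 1 ((0 : Int), (0 : Int))).1 := rfl
  have g2 : PySem.List.pyGetD [(PySem.List.pyGetD cl 0 ((0 : Int), (0 : Int))).1,
      (PySem.List.pyGetD cl 1 ((0 : Int), (0 : Int))).1,
      (PySem.List.pyGetD cl 2 ((0 : Int), (0 : Int))).1] (2 : Int) 0 =
      (PySem.List.pyGetD cl 2 ((0 : Int), (0 : Int))).1 := rfl
  have hc0 : (PySem.List.pyGetD cl 0 ((0 : Int), (0 : Int))).1 = pvVar cl 0 := by
    rw [pvVarGetD]
    rw [show (0 : Int) = ((0 : Nat) : Int) from rfl, PySem.List.pyGetD_natCast]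
  have hc1 : (PySem.List.pyGetD cl 1 ((0 : Int), (0 : Int))).1 = pvVar cl 1 := by
    rw [pvVarGetD]
    rw [show (1 : Int) = ((1 : Nat) : Int) from rfl, PySem.List.pyGetD_natCast]
  have hc2 : (PySem.List.pyGetD cl 2 ((0 : Int), (0 : Int))).1 = pvVar cl 2 := by
    rw [pvVarGetD]
    rw [show (2 : Int) = ((2 : Nat) : Int) from rfl, PySem.List.pyGetD_natCast]
  simp only [pvAltClauseStep, h03, h13, h23, h33, List.foldl_cons, List.foldl_nil]
  rw [g0, g1, g2, hc0, hc1, hc2]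
  rw [pvAddPair, pvAddPair, pvAddPair]
  unfold pvPairIn
  constructor
  · rintro (((h | h) | h) | h)
    · exact Or.inl h
    · exact Or.inr ⟨h.1, h.2.1, h.2.2.1, Or.inl (by omega)⟩
    · exact Or.inr ⟨h.1, h.2.1, h.2.2.1, Or.inr (Or.inl (by omega))⟩
    · exact Or.inr ⟨h.1, h.2.1, h.2.2.1, Or.inr (Or.inr (by omega))⟩
  · rintro (h | ⟨h0, h1, h2, (h | h | h)⟩)
    · exact Or.inl (Or.inl (Or.inl h))
    · exact Or.inl (Or.inl (Or.inr ⟨h0, h1, h2, by omega⟩))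
    · exact Or.inl (Or.inr ⟨h0, h1, h2, by omega⟩)
    · exact Or.inr ⟨h0, h1, h2, by omega⟩

theorem pvAltClauseStep_nodup (n : Int) (edges : PySem.Set (Int × Int))
    (cl : List (Int × Int)) (he : edges.Nodup) : (pvAltClauseStep n edges cl).Nodup := by
  have h03 : PySem.List.pyRange 0 3 1 = [0, 1, 2] := by decide
  have h13 : PySem.List.pyRange (0 + 1) 3 1 = [1, 2] := by decide
  have h23 : PySem.List.pyRange (1 + 1) 3 1 = [2] := by decide
  have h33 : PySem.List.pyRange (2 + 1) 3 1 = [] := by decide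
  simp only [pvAltClauseStep, h03, h13, h23, h33, List.foldl_cons, List.foldl_nil]
  split_ifs <;>
    first
      | exact he
      | exact PySem.Set.nodup_add _ _ he
      | exact PySem.Set.nodup_add _ _ (PySem.Set.nodup_add _ _ he)
      | exact PySem.Set.nodup_add _ _ (PySem.Set.nodup_add _ _ (PySem.Set.nodup_add _ _ he))

theorem pvAltEdges_mem (n : Int) (clauses : List (List (Int × Int))) (e : Int × Int) :
    e ∈ pvAltEdges n clauses ↔
      0 ≤ e.1 ∧ e.1 < e.2 ∧ e.2 < n ∧ pvAdjRel clauses e.1 e.2 := by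
  have hgen : ∀ (s : PySem.Set (Int × Int)),
      e ∈ clauses.foldl (pvAltClauseStep n) s ↔
        e ∈ s ∨ (0 ≤ e.1 ∧ e.1 < e.2 ∧ e.2 < n ∧ pvAdjRel clauses e.1 e.2) := by
    intro s
    induction clauses generalizing s with
    | nil => simp [pvAdjRel]
    | cons cl cls ih =>
      rw [List.foldl_cons, ih, pvAltClauseStep_mem]
      unfold pvAdjRel
      constructor
      · rintro ((h | ⟨h0, h1, h2, hp⟩) | ⟨h0, h1, h2, c, hc, hp⟩)
        · exact Or.inl h
        · exact Or.inr ⟨h0, h1, h2, cl, List.mem_cons_self .., hp⟩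
        · exact Or.inr ⟨h0, h1, h2, c, List.mem_cons_of_mem _ hc, hp⟩
      · rintro (h | ⟨h0, h1, h2, c, hc, hp⟩)
        · exact Or.inl (Or.inl h)
        · rcases List.mem_cons.mp hc with h' | h'
          · exact Or.inl (Or.inr ⟨h0, h1, h2, h' ▸ hp⟩)
          · exact Or.inr ⟨h0, h1, h2, c, h', hp⟩
  unfold pvAltEdges
  rw [hgen]
  simp

theorem pvAltEdges_nodup (n : Int) (clauses : List (List (Int × Int))) :
    (pvAltEdges n clauses).Nodup := by
  have hgen : ∀ (s : PySem.Set (Int × Int)), s.Nodup →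
      (clauses.foldl (pvAltClauseStep n) s).Nodup := by
    intro s
    induction clauses generalizing s with
    | nil => exact fun hs => hs
    | cons cl cls ih =>
      intro hs
      rw [List.foldl_cons]
      exact ih _ (pvAltClauseStep_nodup n s cl hs)
  exact hgen _ List.nodup_nil

theorem pvPre_bound (n : Int) (clauses : List (List (Int × Int)))
    (hpre : Pre_beta1_simplicial n clauses) {v u : Int} (hadj : pvAdjRel clauses v u)
    (h0 : 0 ≤ v) (h1 : v < n) (h2 : v < u) : u < n := by
  obtain ⟨cl, hcl, hp⟩ := hadj
  obtain ⟨_, hb01, hb02, hb12⟩ := hpre cl hcl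
  unfold pvBadPair at hb01 hb02 hb12
  unfold pvPairIn at hp
  rcases hp with (h | h) | (h | h) | (h | h) <;> omega

theorem pvEdges_perm (n : Int) (clauses : List (List (Int × Int)))
    (hpre : Pre_beta1_simplicial n clauses) :
    (pvVigEdgesSet (pvBuildVig n clauses) n).Perm (pvAltEdges n clauses) := by
  rw [List.perm_ext_iff_of_nodup (pvVigEdgesSet_nodup _ _) (pvAltEdges_nodup _ _)]
  intro e
  rw [pvVigEdgesSet_mem, pvAltEdges_mem, pvBuildVig_mem]
  constructor
  · rintro ⟨h0, h1, h2, h3⟩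
    exact ⟨h0, h2, pvPre_bound n clauses hpre h3 h0 h1 h2, h3⟩
  · rintro ⟨h0, h1, h2, h3⟩
    exact ⟨h0, by omega, h1, h3⟩

theorem pvBeforeLe (a b : Int × Int)
    (h : (decide (a.1 < b.1) || (!decide (b.1 < a.1) && decide (a.2 < b.2))) = true) :
    pvLexLe a b := by
  unfold pvLexLe
  simp only [Bool.or_eq_true, Bool.and_eq_true, Bool.not_eq_true', decide_eq_true_eq,
    decide_eq_false_iff_not] at h
  omega

theorem pvBeforeGe (a b : Int × Int)
    (h : (decide (a.1 < b.1) || (!decide (b.1 < a.1) && decide (a.2 < b.2))) = false) :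
    pvLexLe b a := by
  unfold pvLexLe
  by_cases h1 : a.1 < b.1
  · simp [h1] at h
  · by_cases h2 : b.1 < a.1
    · exact Or.inl h2
    · by_cases h3 : a.2 < b.2
      · simp [h1, h2, h3] at h
      · exact Or.inr ⟨by omega, by omega⟩

theorem pvLexLe_trans {a b c : Int × Int} (h1 : pvLexLe a b) (h2 : pvLexLe b c) :
    pvLexLe a c := by
  unfold pvLexLe at *
  omega

theorem pvInsertBy_pairwise (bf : Int × Int → Int × Int → Bool)
    (hbf : ∀ a b, (bf a b = true → pvLexLe a b) ∧ (bf a b = false → pvLexLe b a))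
    (x : Int × Int) (ys : List (Int × Int)) (hys : ys.Pairwise pvLexLe) :
    (PySem.List.insertBy bf x ys).Pairwise pvLexLe := by
  induction ys with
  | nil => simp [PySem.List.insertBy]
  | cons y ys ih =>
    rw [show PySem.List.insertBy bf x (y :: ys) =
        (if bf x y = true then x :: y :: ys else y :: PySem.List.insertBy bf x ys) from rfl]
    rcases List.pairwise_cons.mp hys with ⟨hy, hys'⟩
    by_cases h : bf x y = true
    · rw [if_pos h]
      refine List.pairwise_cons.mpr ⟨?_, hys⟩
      intro z hz
      rcases List.mem_cons.mp hz with h' | h'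
      · exact h' ▸ (hbf x y).1 h
      · exact pvLexLe_trans ((hbf x y).1 h) (hy z h')
    · rw [if_neg h]
      refine List.pairwise_cons.mpr ⟨?_, ih hys'⟩
      intro z hz
      rcases (PySem.List.mem_insertBy bf x z ys).mp hz with h' | h'
      · exact h' ▸ (hbf x y).2 (Bool.eq_false_iff.mpr h)
      · exact hy z h'

theorem pvSorted2_pairwise (xs : List (Int × Int)) :
    (PySem.List.sorted2 xs Prod.fst Prod.snd).Pairwise pvLexLe := by
  have hbf : ∀ a b : Int × Int,
      ((fun a b => decide (a.1 < b.1) || (!decide (b.1 < a.1) && decide (a.2 < b.2))) a b = true →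
        pvLexLe a b) ∧
      ((fun a b => decide (a.1 < b.1) || (!decide (b.1 < a.1) && decide (a.2 < b.2))) a b = false →
        pvLexLe b a) :=
    fun a b => ⟨pvBeforeLe a b, pvBeforeGe a b⟩
  show (List.foldl _ [] xs).Pairwise pvLexLe
  have hgen : ∀ (acc : List (Int × Int)), acc.Pairwise pvLexLe →
      (xs.foldl (fun acc x => PySem.List.insertBy
        (fun a b => decide (a.1 < b.1) || (!decide (b.1 < a.1) && decide (a.2 < b.2))) x acc)
        acc).Pairwise pvLexLe := by
    induction xs with
    | nil => exact fun acc h => h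
    | cons x xs ih =>
      intro acc hacc
      rw [List.foldl_cons]
      exact ih _ (pvInsertBy_pairwise _ hbf x acc hacc)
  exact hgen [] List.Pairwise.nil

theorem pvSorted2_eq_of_perm (xs ys : List (Int × Int)) (hp : xs.Perm ys) (_hx : xs.Nodup) :
    PySem.List.sorted2 xs Prod.fst Prod.snd = PySem.List.sorted2 ys Prod.fst Prod.snd := by
  have hperm : (PySem.List.sorted2 xs Prod.fst Prod.snd).Perm
      (PySem.List.sorted2 ys Prod.fst Prod.snd) :=
    ((PySem.List.sorted2_perm xs _ _ _).trans hp).trans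
      (PySem.List.sorted2_perm ys _ _ _).symm
  refine List.eq_of_perm_of_sorted ?_ (pvSorted2_pairwise xs) (pvSorted2_pairwise ys) hperm
  intro a b _ _ h1 h2
  unfold pvLexLe at h1 h2
  ext <;> omega

-- ---- the union fold and the merge fold keep the same partition of range(n) ----
def pvInv (n : Int) (p : List Int) (comps : List (PySem.Set Int)) : Prop :=
  (p.length : Int) = max n 0 ∧ pvGood p ∧ pvCompsOK n comps ∧
  ∀ a b, pvInR p a → pvInR p b → (pvRoot p a = pvRoot p b ↔ pvSameComp comps a b)

theorem pvInit (n : Int) :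
    pvInv n (PySem.List.pyRange 0 n 1) [] := by
  have hlen : ((PySem.List.pyRange 0 n 1).length : Int) = max n 0 := by
    rw [PySem.List.length_pyRange_one]
    omega
  have hstep : ∀ x, pvInR (PySem.List.pyRange 0 n 1) x →
      pvStep (PySem.List.pyRange 0 n 1) x = x := by
    intro x hx
    obtain ⟨hx0, hx1⟩ := hx
    unfold pvStep
    rw [PySem.List.pyGetD_eq_getElem _ 0 hx0 hx1, PySem.List.getElem_pyRange_one]
    omega
  set p0 := PySem.List.pyRange 0 n 1 with hp0
  have hg : pvGood p0 := by
    constructor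
    · intro x hx; rw [hstep x hx]; exact hx
    · intro x hx; exact ⟨0, hstep x hx⟩
  have hroot : ∀ x, pvInR p0 x → pvRoot p0 x = x :=
    fun x hx => pvRoot_of_isRoot p0 hg (hstep x hx) hx
  refine ⟨hlen, hg, ⟨by simp, List.Pairwise.nil⟩, ?_⟩
  intro a b ha hb
  rw [hroot a ha, hroot b hb]
  unfold pvSameComp
  simp

theorem pvFoldInv (n : Int) (E : List (Int × Int))
    (hE : ∀ e ∈ E, 0 ≤ e.1 ∧ e.1 < e.2 ∧ e.2 < n) :
    ∀ (p rank : List Int) (comps : List (PySem.Set Int)), pvInv n p comps →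
      pvInv n (E.foldl (fun (pr : List Int × List Int) e => pvUfUnion pr.1 pr.2 e.1 e.2)
          (p, rank)).1
        (E.foldl pvMergeStep comps) := by
  induction E with
  | nil => exact fun p rank comps h => h
  | cons e E ih =>
    intro p rank comps hinv
    obtain ⟨hlen, hg, hok, hiff⟩ := hinv
    obtain ⟨he0, he1, he2⟩ := hE e (List.mem_cons_self ..)
    have ha : pvInR p e.1 := ⟨he0, by omega⟩
    have hb : pvInR p e.2 := ⟨by omega, by omega⟩
    obtain ⟨hlen', hg', hiff'⟩ := pvUfUnion_spec p rank hg ha hb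
    obtain ⟨hok', hsc'⟩ := pvMergeStep_spec n comps hok he0 he1 he2
    rw [List.foldl_cons, List.foldl_cons]
    have hms : pvMergeStep comps e = pvMergeStep comps (e.1, e.2) := by
      rcases e with ⟨a, b⟩; rfl
    rw [hms]
    have hinv' : pvInv n (pvUfUnion p rank e.1 e.2).1 (pvMergeStep comps (e.1, e.2)) := by
      refine ⟨by rw [hlen', hlen], hg', hok', ?_⟩
      intro a b ha' hb'
      have haP : pvInR p a := (pvInR_congr hlen' a).mp ha'
      have hbP : pvInR p b := (pvInR_congr hlen' b).mp hb'
      rw [hiff' a b haP hbP, hsc' a b,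
        hiff a b haP hbP, hiff a e.1 haP ha, hiff b e.2 hbP hb,
        hiff a e.2 haP hb, hiff b e.1 hbP ha]
    exact ih (fun e' he' => hE e' (List.mem_cons_of_mem _ he'))
      (pvUfUnion p rank e.1 e.2).1 (pvUfUnion p rank e.1 e.2).2 _ hinv'

-- the root-scan fold: collects exactly the set of roots of range(n)
theorem pvFindFold (rng : List Int) :
    ∀ (q p : List Int) (s : PySem.Set Int), pvGood q →
      (∀ i ∈ rng, pvInR q i) → (∀ i ∈ rng, pvRoot q i = pvRoot p i) →
      (rng.foldl (fun (st : PySem.Set Int × List Int) i =>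
          let f := pvUfFind st.2.length st.2 i
          (PySem.Set.add st.1 f.1, f.2)) (s, q)).1
        = rng.foldl (fun s i => PySem.Set.add s (pvRoot p i)) s := by
  induction rng with
  | nil => intro q p s _ _ _; rfl
  | cons i rng ih =>
    intro q p s hg hin hroots
    have hi : pvInR q i := hin i (List.mem_cons_self ..)
    obtain ⟨hf1, hflen, hfg, hfroots⟩ := pvUfFind_spec' q hg hi
    rw [List.foldl_cons, List.foldl_cons]
    have h1 : (pvUfFind q.length q i).1 = pvRoot p i := by
      rw [hf1, hroots i (List.mem_cons_self ..)]
    simp only [h1]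
    refine ih _ p _ hfg ?_ ?_
    · intro j hj
      exact (pvInR_congr hflen j).mpr (hin j (List.mem_cons_of_mem _ hj))
    · intro j hj
      rw [hfroots j (hin j (List.mem_cons_of_mem _ hj)),
        hroots j (List.mem_cons_of_mem _ hj)]

theorem pvFoldAdd (rng : List Int) (r : Int → Int) (s : PySem.Set Int) :
    rng.foldl (fun s i => PySem.Set.add s (r i)) s = PySem.Set.update s (rng.map r) := by
  unfold PySem.Set.update
  rw [List.foldl_map]

-- ===== VERDICT (by name: the statement is the Claim_ definition above) =====
theorem beta1_simplicial_spec : Claim_equal_beta1_simplicial := by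
  intro n clauses _hdom hpre
  unfold Spec_beta1_simplicial
  -- zeta-reduced forms of the two ports
  have hA : beta1_simplicial n clauses =
      max (PySem.List.len (pvVigEdges (pvBuildVig n clauses) n) - n +
        ((((PySem.List.pyRange 0 n 1).foldl
            (fun (st : PySem.Set Int × List Int) i =>
              (PySem.Set.add st.1 (pvUfFind st.2.length st.2 i).1,
                (pvUfFind st.2.length st.2 i).2))
            (([] : PySem.Set Int),
              ((pvVigEdges (pvBuildVig n clauses) n).foldl
                (fun (pr : List Int × List Int) e => pvUfUnion pr.1 pr.2 e.1 e.2)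
                (PySem.List.pyRange 0 n 1, List.replicate n.toNat 0)).1)).1.length : Int))
        - PySem.List.len clauses) 0 := rfl
  have hB : beta1_simplicial_alt n clauses =
      max (PySem.Set.len (pvAltEdges n clauses) - n +
        ((((PySem.List.sorted2 (pvAltEdges n clauses) Prod.fst Prod.snd).foldl
              pvMergeStep []).length : Int) +
          (((PySem.List.pyRange 0 n 1).countP
             (fun v => ((PySem.List.sorted2 (pvAltEdges n clauses) Prod.fst Prod.snd).foldl
                 pvMergeStep []).all (fun c => !PySem.Set.contains c v)) : Nat) : Int))
        - PySem.List.len clauses) 0 := rfl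
  have hedges : pvVigEdges (pvBuildVig n clauses) n =
      PySem.List.sorted2 (pvAltEdges n clauses) Prod.fst Prod.snd := by
    unfold pvVigEdges
    exact pvSorted2_eq_of_perm _ _ (pvEdges_perm n clauses hpre) (pvVigEdgesSet_nodup _ _)
  rw [hA, hB, hedges]
  set E := PySem.List.sorted2 (pvAltEdges n clauses) Prod.fst Prod.snd with hEdef
  have hEbound : ∀ e ∈ E, 0 ≤ e.1 ∧ e.1 < e.2 ∧ e.2 < n := by
    intro e he
    have : e ∈ pvAltEdges n clauses :=
      (PySem.List.sorted2_perm (pvAltEdges n clauses) _ _ _).mem_iff.mp (hEdef ▸ he)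
    obtain ⟨h0, h1, h2, _⟩ := (pvAltEdges_mem n clauses e).mp this
    exact ⟨h0, h1, h2⟩
  have hinv := pvFoldInv n E hEbound (PySem.List.pyRange 0 n 1)
    (List.replicate n.toNat 0) [] (pvInit n)
  set pr := E.foldl (fun (pr : List Int × List Int) e => pvUfUnion pr.1 pr.2 e.1 e.2)
    (PySem.List.pyRange 0 n 1, List.replicate n.toNat 0) with hprdef
  set comps := E.foldl pvMergeStep [] with hcompsdef
  obtain ⟨hlen, hg, hok, hiff⟩ := hinv
  have hrng_in : ∀ i ∈ PySem.List.pyRange 0 n 1, pvInR pr.1 i := by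
    intro i hi
    rw [PySem.List.mem_pyRange_one] at hi
    exact ⟨hi.1, by omega⟩
  have hst := pvFindFold (PySem.List.pyRange 0 n 1) pr.1 pr.1 [] hg hrng_in
    (fun i _ => rfl)
  rw [hst, pvFoldAdd]
  have hupd : PySem.Set.update ([] : PySem.Set Int)
      ((PySem.List.pyRange 0 n 1).map (pvRoot pr.1)) =
      PySem.Set.ofList ((PySem.List.pyRange 0 n 1).map (pvRoot pr.1)) := rfl
  rw [hupd]
  have hcount := pvCount n pr.1 comps hg hlen hok hiff
  have hlenE : PySem.List.len E = PySem.Set.len (pvAltEdges n clauses) := by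
    unfold PySem.List.len PySem.Set.len
    rw [hEdef]
    exact_mod_cast congrArg Nat.cast
      (PySem.List.sorted2_perm (pvAltEdges n clauses) _ _ _).length_eq
  rw [hlenE]
  omega
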